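-- pv_equiv track=rewrite | github.com/NorAlnaami/dataMining | ID2222/HW2New/apriori.py | keep_singles_inMain
-- ===== SOURCE A (Python) =====
-- def keep_singles_inMain(baskets, singles):
--     keep = []
--     for i in range(len(baskets)):
--         keep_list = []
--         for single in singles:
--             if single in baskets[i]:
--                 keep_list.append(single)
--         keep.append(set(keep_list))
--
--     return keep
-- ===== SOURCE B (Python) =====
-- def keep_singles_inMain(baskets, singles):
--     # Inverted index: element -> list of basket indices containing it (built in one
--     # pass), then one pass over singles distributes each single to its baskets.
--     occ = {}
--     for i, basket in enumerate(baskets):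
--         for x in basket:
--             occ.setdefault(x, []).append(i)
--     keep = [set() for _ in baskets]
--     for s in singles:
--         for i in occ.get(s, ()):
--             keep[i].add(s)
--     return keep
-- ===== Notes on version B (the rewrite author's own statement) =====
-- stated objective: faster
-- what changed: Replaces the per-basket scan over all singles (membership tested by scanning the basket list) with an inverted index element->basket indices built in one pass, then a single pass over singles distributing each single to exactly the baskets that contain it.
import Mathlib
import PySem

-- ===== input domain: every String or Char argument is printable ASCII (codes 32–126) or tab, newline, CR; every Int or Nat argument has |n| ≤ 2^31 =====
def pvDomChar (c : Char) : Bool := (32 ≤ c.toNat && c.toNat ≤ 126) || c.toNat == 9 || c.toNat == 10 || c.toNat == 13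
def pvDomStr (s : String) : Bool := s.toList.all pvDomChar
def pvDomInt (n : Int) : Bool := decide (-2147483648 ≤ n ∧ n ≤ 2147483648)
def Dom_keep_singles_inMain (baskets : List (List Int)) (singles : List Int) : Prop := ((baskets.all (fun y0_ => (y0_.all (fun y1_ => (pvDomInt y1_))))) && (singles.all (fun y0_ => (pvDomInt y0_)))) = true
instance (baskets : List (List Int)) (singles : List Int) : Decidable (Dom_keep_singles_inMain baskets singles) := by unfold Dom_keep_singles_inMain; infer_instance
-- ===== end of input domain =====

-- B replaces A's per-basket scan over all singles with an inverted index
-- (element -> basket indices) built in one pass and a single distributing pass over singles.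

-- ===== PORT A =====
def keep_singles_inMain (baskets : List (List Int)) (singles : List Int) : List (List Int) :=
  (PySem.List.pyRange 0 baskets.length 1).foldl
    (fun keep i =>
      let keep_list := singles.foldl
        (fun kl single =>
          if single ∈ PySem.List.pyGetD baskets i [] then kl ++ [single] else kl) []
      keep ++ [PySem.Set.ofList keep_list]) []

-- ===== PORT B =====
def keep_singles_inMain_alt (baskets : List (List Int)) (singles : List Int) : List (List Int) :=
  let occ : PySem.Dict Int (List Int) :=
    (PySem.List.enumerate baskets).foldl
      (fun d p => p.2.foldl (fun d x => d.modify x [] (· ++ [p.1])) d) PySem.Dict.empty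
  let keep0 : List (PySem.Set Int) := baskets.map (fun _ => PySem.Set.empty)
  singles.foldl
    (fun keep s =>
      (occ.getD s []).foldl
        (fun keep i =>
          PySem.List.pySetD keep i (PySem.Set.add (PySem.List.pyGetD keep i []) s)) keep)
    keep0

-- ===== PRECONDITION & SPEC =====
def Spec_keep_singles_inMain (baskets : List (List Int)) (singles : List Int) (out : List (List Int)) : Prop := out = keep_singles_inMain_alt baskets singles
instance (baskets : List (List Int)) (singles : List Int) (out : List (List Int)) : Decidable (Spec_keep_singles_inMain baskets singles out) := by unfold Spec_keep_singles_inMain; infer_instance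

-- ===== CLAIM (what is proved, stated in full; the proofs are below) =====
def Claim_equal_keep_singles_inMain : Prop := ∀ (baskets : List (List Int)) (singles : List Int), Dom_keep_singles_inMain baskets singles → Spec_keep_singles_inMain baskets singles (keep_singles_inMain baskets singles)

-- ===== LEMMAS AND PROOFS =====

-- canonical per-basket result: fold singles, adding those present in the basket
def pvCanon (b : List Int) (singles : List Int) : PySem.Set Int :=
  singles.foldl (fun st s => if s ∈ b then PySem.Set.add st s else st) []

-- filter-then-fold-add equals fold with a conditional add
theorem pvFoldlAddFilter (p : Int → Prop) [DecidablePred p] (l : List Int) (init : PySem.Set Int) :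
    (l.filter (fun x => decide (p x))).foldl PySem.Set.add init
      = l.foldl (fun st s => if p s then PySem.Set.add st s else st) init := by
  induction l generalizing init with
  | nil => rfl
  | cons x xs ih => by_cases h : p x <;> simp [h, ih]

theorem keep_singles_inMain_eq_canon (baskets : List (List Int)) (singles : List Int) :
    keep_singles_inMain baskets singles = baskets.map (fun b => pvCanon b singles) := by
  unfold keep_singles_inMain
  rw [PySem.List.foldl_append_singleton_eq_map]
  have h1 : ∀ i : Int, PySem.Set.ofList (singles.foldl
      (fun kl single => if single ∈ PySem.List.pyGetD baskets i [] then kl ++ [single] else kl) [])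
      = pvCanon (PySem.List.pyGetD baskets i []) singles := by
    intro i
    rw [PySem.List.foldl_append_ite_eq_filter, PySem.Set.ofList_eq_foldl]
    simpa using pvFoldlAddFilter (fun s => s ∈ PySem.List.pyGetD baskets i []) singles []
  simp only [h1]
  have h2 := PySem.List.map_pyGetD_pyRange_zero' (xs := baskets) (d := ([] : List Int))
  calc (PySem.List.pyRange 0 (baskets.length : Int) 1).map (fun i => pvCanon (PySem.List.pyGetD baskets i []) singles)
      = ((PySem.List.pyRange 0 (baskets.length : Int) 1).map (fun j => PySem.List.pyGetD baskets j [])).map (fun b => pvCanon b singles) := by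
        rw [List.map_map]; rfl
    _ = baskets.map (fun b => pvCanon b singles) := by rw [h2]

-- B's inverted index, named for the proofs
def pvOcc (baskets : List (List Int)) : PySem.Dict Int (List Int) :=
  (PySem.List.enumerate baskets).foldl
    (fun d p => p.2.foldl (fun d x => d.modify x [] (· ++ [p.1])) d) PySem.Dict.empty

-- nested build = flat build over (element, index) pairs
theorem pvOccFlat (L : List (Int × List Int)) (d0 : PySem.Dict Int (List Int)) :
    L.foldl (fun d p => p.2.foldl (fun d x => d.modify x [] (· ++ [p.1])) d) d0
      = (L.flatMap (fun p => p.2.map (fun x => (x, p.1)))).foldl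
          (fun d q => d.modify q.1 [] (· ++ [q.2])) d0 := by
  induction L generalizing d0 with
  | nil => rfl
  | cons p L ih =>
      simp only [List.foldl_cons, List.flatMap_cons, List.foldl_append, List.foldl_map, ih]

theorem pvMemOccGetD (baskets : List (List Int)) (x j : Int) :
    j ∈ (pvOcc baskets).getD x [] ↔
      ∃ k : Nat, ∃ h : k < baskets.length, j = (k : Int) ∧ x ∈ baskets[k] := by
  rw [pvOcc, pvOccFlat, PySem.Dict.getD_foldl_modify_append]
  simp [PySem.List.mem_enumerate_iff, List.mem_flatMap]
  exact ⟨fun ⟨k, h, e⟩ => ⟨k, e.symm, h⟩, fun ⟨k, e, h⟩ => ⟨k, h, e.symm⟩⟩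

-- effect of one pySetD step at the touched index
theorem pvSetStepSelf (keep : List (PySem.Set Int)) (j : Nat) (s : Int) :
    (PySem.List.pySetD keep (j : Int) (PySem.Set.add (PySem.List.pyGetD keep (j : Int) []) s))[j]?
      = keep[j]?.map (fun st => PySem.Set.add st s) := by
  by_cases hj : j < keep.length
  · simp [PySem.List.pySetD_natCast, PySem.List.pyGetD_natCast, hj, List.getD]
  · simp [PySem.List.pySetD_natCast, List.getElem?_eq_none (by omega : keep.length ≤ j),
      List.set_eq_of_length_le (by omega : keep.length ≤ j)]

-- effect of the inner distribution loop at position j (repeated adds collapse)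
theorem pvInnerGet (s : Int) (L : List Int) :
    ∀ (keep : List (PySem.Set Int)) (j : Nat), (∀ i ∈ L, ∃ k : Nat, i = (k : Int)) →
    (L.foldl (fun keep i =>
        PySem.List.pySetD keep i (PySem.Set.add (PySem.List.pyGetD keep i []) s)) keep)[j]?
      = if (j : Int) ∈ L then keep[j]?.map (fun st => PySem.Set.add st s) else keep[j]? := by
  induction L with
  | nil => intro keep j _; simp
  | cons i L ih =>
      intro keep j hL
      obtain ⟨k, rfl⟩ := hL i (by simp)
      have hL' : ∀ i ∈ L, ∃ k : Nat, i = (k : Int) := fun i hi => hL i (by simp [hi])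
      by_cases hk : k = j
      · subst hk
        rw [List.foldl_cons, ih _ _ hL']
        have hss := pvSetStepSelf keep k s
        by_cases hmem : (k : Int) ∈ L
        · rw [if_pos hmem, hss, if_pos (by simp), Option.map_map]
          cases h : keep[k]? with
          | none => simp
          | some st => simp [Function.comp_def]
        · rw [if_neg hmem, hss, if_pos (by simp)]
      · rw [List.foldl_cons, ih _ _ hL']
        have hne : (PySem.List.pySetD keep (k : Int)
            (PySem.Set.add (PySem.List.pyGetD keep (k : Int) []) s))[j]? = keep[j]? := by
          simp [PySem.List.pySetD_natCast, List.getElem?_set_ne (by omega : k ≠ j)]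
        by_cases hmem : (j : Int) ∈ L
        · rw [if_pos hmem, hne, if_pos (by simp [hmem])]
        · rw [if_neg hmem, hne, if_neg (by simp [hmem]; omega)]

theorem pvInnerLength (s : Int) (L : List Int) (keep : List (PySem.Set Int)) :
    (L.foldl (fun keep i =>
        PySem.List.pySetD keep i (PySem.Set.add (PySem.List.pyGetD keep i []) s)) keep).length
      = keep.length := by
  induction L generalizing keep with
  | nil => rfl
  | cons i L ih => simp [ih, PySem.List.length_pySetD]

theorem pvOuterLength (baskets : List (List Int)) (singles : List Int)
    (keep : List (PySem.Set Int)) :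
    (singles.foldl (fun keep s =>
        ((pvOcc baskets).getD s []).foldl
          (fun keep i =>
            PySem.List.pySetD keep i (PySem.Set.add (PySem.List.pyGetD keep i []) s)) keep)
      keep).length = keep.length := by
  induction singles generalizing keep with
  | nil => rfl
  | cons s singles ih => simp [ih, pvInnerLength]

theorem pvPhase2 (baskets : List (List Int)) (singles : List Int) (j : Nat)
    (hj : j < baskets.length) :
    ∀ keep : List (PySem.Set Int),
    (singles.foldl (fun keep s =>
        ((pvOcc baskets).getD s []).foldl
          (fun keep i =>
            PySem.List.pySetD keep i (PySem.Set.add (PySem.List.pyGetD keep i []) s)) keep)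
      keep)[j]?
      = keep[j]?.map (fun st =>
          singles.foldl (fun st s => if s ∈ baskets[j] then PySem.Set.add st s else st) st) := by
  induction singles with
  | nil => intro keep; cases h : keep[j]? <;> simp [h]
  | cons s singles ih =>
      intro keep
      rw [List.foldl_cons, ih]
      have hL : ∀ i ∈ (pvOcc baskets).getD s [], ∃ k : Nat, i = (k : Int) := by
        intro i hi
        obtain ⟨k, _, rfl, _⟩ := (pvMemOccGetD baskets s i).mp hi
        exact ⟨k, rfl⟩
      rw [pvInnerGet s _ keep j hL]
      have hcond : ((j : Int) ∈ (pvOcc baskets).getD s []) ↔ s ∈ baskets[j] := by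
        rw [pvMemOccGetD]
        constructor
        · rintro ⟨k, hk, hjk, hx⟩
          have : j = k := by exact_mod_cast hjk
          subst this; exact hx
        · intro hx; exact ⟨j, hj, rfl, hx⟩
      by_cases hs : s ∈ baskets[j]
      · rw [if_pos (hcond.mpr hs), Option.map_map]
        cases keep[j]? <;> simp [hs]
      · rw [if_neg (fun h => hs (hcond.mp h))]
        cases keep[j]? <;> simp [hs]

theorem keep_singles_inMain_alt_eq_canon (baskets : List (List Int)) (singles : List Int) :
    keep_singles_inMain_alt baskets singles = baskets.map (fun b => pvCanon b singles) := by
  unfold keep_singles_inMain_alt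
  rw [show ((PySem.List.enumerate baskets).foldl
      (fun d p => p.2.foldl (fun d x => d.modify x [] (· ++ [p.1])) d) PySem.Dict.empty)
      = pvOcc baskets from rfl]
  apply List.ext_getElem?
  intro j
  by_cases hj : j < baskets.length
  · rw [pvPhase2 baskets singles j hj]
    simp only [List.getElem?_map, pvCanon, PySem.Set.empty]
    rw [List.getElem?_eq_getElem hj]
    rfl
  · rw [List.getElem?_eq_none (by rw [pvOuterLength]; simp; omega),
        List.getElem?_eq_none (by simp; omega)]

-- ===== VERDICT (by name: the statement is the Claim_ definition above) =====
theorem keep_singles_inMain_spec : Claim_equal_keep_singles_inMain := by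
  intro baskets singles _
  unfold Spec_keep_singles_inMain
  rw [keep_singles_inMain_eq_canon, keep_singles_inMain_alt_eq_canon]
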